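-- pv_equiv track=rewrite | github.com/jeffwindsor/advent-of-code-2025 | 03_lobby.py | strongest_batteries
-- ===== SOURCE A (Python) =====
-- def strongest_batteries(battery_bank: str, max_batteries: int) -> int:
--     total_batteries = len(battery_bank)
--     removals_allowed = total_batteries - max_batteries
--     active_batteries = []
--
--     for battery_strength in battery_bank:
--         while (
--             active_batteries
--             and removals_allowed > 0
--             and active_batteries[-1] < battery_strength
--         ):
--             active_batteries.pop()
--             removals_allowed -= 1
--
--         active_batteries.append(battery_strength)
--
--     selected_batteries = active_batteries[:max_batteries]
--     return int("".join(selected_batteries))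
-- ===== SOURCE B (Python) =====
-- def strongest_batteries(battery_bank: str, max_batteries: int) -> int:
--     # Greedy window selection instead of a monotonic stack.
--     if max_batteries >= len(battery_bank):
--         return int(battery_bank)
--     s = battery_bank
--     k = max_batteries
--     picked = []
--     while k > 0:
--         window = s[: len(s) - k + 1]
--         m = max(window)
--         j = window.index(m)
--         picked.append(m)
--         s = s[j + 1:]
--         k -= 1
--     return int("".join(picked))
-- ===== Notes on version B (the rewrite author's own statement) =====
-- stated objective: alternative
-- what changed: Replaces the single-pass monotonic stack (pop while smaller and removals remain, then truncate) by a greedy window scan that, for each of the k output positions, picks the leftmost maximum of the currently feasible window and restarts after it.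
-- outside the precondition, e.g. on strongest_batteries('21', -1): A returns 2, B raises ValueError; on strongest_batteries('+55', 2): A returns 55, B returns 55
import Mathlib
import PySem

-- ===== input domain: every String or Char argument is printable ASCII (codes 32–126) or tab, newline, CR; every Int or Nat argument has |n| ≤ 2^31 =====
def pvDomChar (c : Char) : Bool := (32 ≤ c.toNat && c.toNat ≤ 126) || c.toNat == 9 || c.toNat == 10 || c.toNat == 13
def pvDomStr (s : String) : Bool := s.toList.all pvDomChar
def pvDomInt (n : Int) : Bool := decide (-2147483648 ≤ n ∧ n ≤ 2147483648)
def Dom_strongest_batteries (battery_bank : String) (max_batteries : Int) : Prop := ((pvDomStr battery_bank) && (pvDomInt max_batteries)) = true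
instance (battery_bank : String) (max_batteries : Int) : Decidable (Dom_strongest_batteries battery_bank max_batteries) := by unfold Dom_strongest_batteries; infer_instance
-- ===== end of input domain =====

-- B replaces A's monotonic stack by a per-position greedy window scan (alternative
-- decomposition, not faster); equal return values whenever max_batteries ≥ 1 and the
-- selected digits parse.

-- ===== PORT A =====
-- the inner `while` loop: pop while stack nonempty, removals remain, top < current char
def pvPop (stack : List Char) (r : Int) (c : Char) : List Char × Int :=
  match hst : stack.getLast? with
  | some x => if 0 < r ∧ x < c then pvPop stack.dropLast (r - 1) c else (stack, r)
  | none => (stack, r)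
termination_by stack.length
decreasing_by
  cases stack with
  | nil => simp at hst
  | cons a t => simp [List.length_dropLast]

-- the outer `for` loop over the characters of the bank
def pvRun (stack : List Char) (r : Int) : List Char → List Char
  | [] => stack
  | c :: cs => pvRun ((pvPop stack r c).1 ++ [c]) (pvPop stack r c).2 cs

def strongest_batteries (battery_bank : String) (max_batteries : Int) : Int :=
  let s := battery_bank.toList
  let total : Int := s.length
  let stack := pvRun [] (total - max_batteries) s
  let selected := PySem.List.slice stack none (some max_batteries)
  (PySem.Int.ofChars? selected).getD 0   -- int("".join(...)); none (ValueError) excluded by Pre_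

-- ===== PORT B =====
-- the `while k > 0` loop of Source B: pick leftmost max of the feasible window, recurse after it
def pvPick (s : List Char) (k : Int) : List Char :=
  if h : 0 < k then
    let window := PySem.List.slice s none (some ((s.length : Int) - k + 1))
    let m := (PySem.List.max? window (fun x => x)).getD ' '     -- max(window); window nonempty under Pre_
    let j := (PySem.List.index? window m).getD 0                -- window.index(m)
    m :: pvPick (PySem.List.slice s (some ((j : Int) + 1)) none) (k - 1)
  else []
termination_by k.toNat
decreasing_by omega

def strongest_batteries_alt (battery_bank : String) (max_batteries : Int) : Int :=
  let s := battery_bank.toList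
  if (s.length : Int) ≤ max_batteries then (PySem.Int.ofChars? s).getD 0   -- int(battery_bank)
  else (PySem.Int.ofChars? (pvPick s max_batteries)).getD 0

-- ===== PRECONDITION & SPEC =====
-- Pre_ excludes nonpositive max_batteries (the empty or negative-slice selection: a
-- ValueError or an accidental value of A's slice arithmetic) and the inputs whose selected
-- characters would not parse as an int: when max_batteries ≥ len the whole bank must be
-- int-parseable, otherwise the bank must be all digits.
def Pre_strongest_batteries (battery_bank : String) (max_batteries : Int) : Prop :=
  1 ≤ max_batteries ∧
  ((battery_bank.toList.length : Int) ≤ max_batteries → (PySem.Int.ofStr? battery_bank).isSome = true) ∧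
  (max_batteries < (battery_bank.toList.length : Int) → battery_bank.toList.all Char.isDigit = true)
instance (battery_bank : String) (max_batteries : Int) : Decidable (Pre_strongest_batteries battery_bank max_batteries) := by
  unfold Pre_strongest_batteries; infer_instance

def pvWitness_strongest_batteries : String × Int := ("329", 2)

def Spec_strongest_batteries (battery_bank : String) (max_batteries : Int) (out : Int) : Prop := out = strongest_batteries_alt battery_bank max_batteries
instance (battery_bank : String) (max_batteries : Int) (out : Int) : Decidable (Spec_strongest_batteries battery_bank max_batteries out) := by unfold Spec_strongest_batteries; infer_instance

-- ===== CLAIM (what is proved, stated in full; the proofs are below) =====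
def Claim_equal_strongest_batteries : Prop := ∀ (battery_bank : String) (max_batteries : Int), Dom_strongest_batteries battery_bank max_batteries → Pre_strongest_batteries battery_bank max_batteries → Spec_strongest_batteries battery_bank max_batteries (strongest_batteries battery_bank max_batteries)

-- ===== LEMMAS AND PROOFS =====

theorem pvPop_nil (r : Int) (c : Char) : pvPop [] r c = ([], r) := by
  rw [pvPop]; simp

theorem pvPop_nonpos (st : List Char) (r : Int) (c : Char) (hr : r ≤ 0) :
    pvPop st r c = (st, r) := by
  rw [pvPop]
  cases hst : st.getLast? with
  | none => rfl
  | some x => simp; omega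

theorem pvPop_concat (st : List Char) (x : Char) (r : Int) (c : Char) :
    pvPop (st ++ [x]) r c = if 0 < r ∧ x < c then pvPop st (r-1) c else (st ++ [x], r) := by
  rw [pvPop]
  split
  · rename_i x1 hst
    rw [List.getLast?_concat] at hst
    injection hst with hx
    subst hx
    simp
  · rename_i hst
    rw [List.getLast?_concat] at hst
    exact absurd hst (by simp)

theorem pvPop_spec (st : List Char) (r : Int) (c : Char) :
    (pvPop st r c).1 <+: st ∧
    (pvPop st r c).2 = r - st.length + (pvPop st r c).1.length ∧
    (0 ≤ r → 0 ≤ (pvPop st r c).2) := by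
  induction st using List.reverseRecOn generalizing r with
  | nil => simp [pvPop_nil]
  | append_singleton t x ih =>
    rw [pvPop_concat]
    split
    · rename_i h
      obtain ⟨h1, h2, h3⟩ := ih (r - 1)
      refine ⟨h1.trans (List.prefix_append _ _), ?_, ?_⟩
      · simp; omega
      · intro h0
        by_cases h' : r - 1 ≤ 0
        · rw [pvPop_nonpos _ _ _ h'] at h2 ⊢
          omega
        · exact h3 (by omega)
    · simp
theorem pvPop_cons_stuck (a c : Char) (st : List Char) (r : Int)
    (h : a < c → r ≤ (st.length : Int)) :
    pvPop (a :: st) r c = (a :: (pvPop st r c).1, (pvPop st r c).2) := by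
  induction st using List.reverseRecOn generalizing r with
  | nil =>
    rw [pvPop_nil]
    rw [show (a :: ([] : List Char)) = [] ++ [a] by simp, pvPop_concat]
    simp at h
    split
    · rename_i hc
      have := h hc.2
      exfalso; omega
    · simp
  | append_singleton t x ih =>
    rw [show a :: (t ++ [x]) = (a :: t) ++ [x] by simp, pvPop_concat, pvPop_concat]
    split
    · rename_i hc
      exact ih (r - 1) (by simp at h ⊢; omega)
    · simp

theorem pvPop_cons_budget (a c : Char) (st : List Char) (r : Int)
    (hac : ¬ a < c) (hr : (st.length : Int) < r) :
    pvPop (a :: st) r c = (a :: (pvPop st (r - 1) c).1, (pvPop st (r - 1) c).2 + 1) := by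
  induction st using List.reverseRecOn generalizing r with
  | nil =>
    rw [pvPop_nil]
    rw [show (a :: ([] : List Char)) = [] ++ [a] by simp, pvPop_concat]
    split
    · rename_i hc; exact absurd hc.2 hac
    · simp
  | append_singleton t x ih =>
    rw [show a :: (t ++ [x]) = (a :: t) ++ [x] by simp, pvPop_concat, pvPop_concat]
    simp only [List.length_append, List.length_cons, List.length_nil] at hr ⊢
    have h1 : (0 < r ∧ x < c) ↔ (0 < r - 1 ∧ x < c) := by
      constructor
      · rintro ⟨_, hx⟩; exact ⟨by omega, hx⟩
      · rintro ⟨_, hx⟩; exact ⟨by omega, hx⟩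
    split
    · rename_i hc
      rw [if_pos (h1.mp hc)]
      have := ih (r - 1) (by push_cast at hr ⊢; omega)
      rw [show r - 1 - 1 = r - 1 - 1 by rfl] at this
      exact this
    · rename_i hc
      rw [if_neg (fun h2 => hc (h1.mpr h2))]
      simp

theorem pvPop_flush (st : List Char) (r : Int) (c : Char)
    (hall : ∀ x ∈ st, x < c) (hr : (st.length : Int) ≤ r) :
    pvPop st r c = ([], r - st.length) := by
  induction st using List.reverseRecOn generalizing r with
  | nil => rw [pvPop_nil]; simp
  | append_singleton t x ih =>
    rw [pvPop_concat]
    rw [if_pos ⟨by simp at hr; omega, hall x (by simp)⟩]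
    rw [ih (r - 1) (fun y hy => hall y (by simp [hy])) (by simp at hr ⊢; omega)]
    simp; omega
theorem pvRun_nonpos (u : List Char) (st : List Char) (r : Int) (hr : r ≤ 0) :
    pvRun st r u = st ++ u := by
  induction u generalizing st r with
  | nil => simp [pvRun]
  | cons c cs ih => simp [pvRun, pvPop_nonpos _ _ _ hr, ih _ _ hr]

theorem pvRun_bottom_fixed (u : List Char) (a : Char) (st : List Char) (r : Int)
    (hr : 0 ≤ r)
    (h : ∀ (i : Nat) (hi : i < u.length), a < u[i] → r ≤ (st.length : Int) + i) :
    pvRun (a :: st) r u = a :: pvRun st r u := by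
  induction u generalizing st r with
  | nil => simp [pvRun]
  | cons c cs ih =>
    have h0 : a < c → r ≤ (st.length : Int) := fun hac => by
      have := h 0 (by simp) (by simpa using hac)
      omega
    simp only [pvRun]
    rw [pvPop_cons_stuck a c st r h0]
    obtain ⟨hpre, hlen, hpos⟩ := pvPop_spec st r c
    have hple := hpre.length_le
    rw [show (a :: (pvPop st r c).1) ++ [c] = a :: ((pvPop st r c).1 ++ [c]) by simp]
    refine ih ((pvPop st r c).1 ++ [c]) (pvPop st r c).2 (hpos hr) ?_
    intro i hi hai
    have := h (i + 1) (by simpa using hi) (by simpa using hai)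
    simp only [List.length_append, List.length_cons, List.length_nil]
    push_cast
    omega

theorem pvRun_bottom_popped (i₀ : Nat) (u : List Char) (a : Char) (st : List Char) (r : Int)
    (hi : i₀ < u.length)
    (hbefore : ∀ (i : Nat), i < i₀ → ∀ (hh : i < u.length), u[i] ≤ a)
    (hat : a < u[i₀])
    (hbud : (i₀ : Int) + st.length < r)
    (hst : ∀ x ∈ st, x ≤ a) :
    pvRun (a :: st) r u = pvRun st (r - 1) u := by
  induction i₀ generalizing u st r with
  | zero =>
    cases u with
    | nil => simp at hi
    | cons c cs =>
      have hac : a < c := by simpa using hat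
      simp only [pvRun]
      have hallc : ∀ x ∈ st, x < c := fun x hx => lt_of_le_of_lt (hst x hx) hac
      have hflushL : pvPop (a :: st) r c = ([], r - (st.length + 1)) := by
        have := pvPop_flush (a :: st) r c
          (by
            intro x hx
            rcases List.mem_cons.mp hx with h | h
            · subst h; exact hac
            · exact hallc x h)
          (by simp; omega)
        simpa using this
      have hflushR : pvPop st (r - 1) c = ([], r - 1 - st.length) := by
        exact pvPop_flush st (r - 1) c hallc (by omega)
      rw [hflushL, hflushR]
      simp only []
      congr 1
      omega
  | succ i' ih =>
    cases u with
    | nil => simp at hi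
    | cons c cs =>
      have hca : c ≤ a := by
        have := hbefore 0 (Nat.succ_pos i') (by simp)
        simpa using this
      simp only [pvRun]
      rw [pvPop_cons_budget a c st r (not_lt.mpr hca) (by omega)]
      obtain ⟨hpre, hlen, hpos⟩ := pvPop_spec st (r - 1) c
      have hple := hpre.length_le
      rw [show (a :: (pvPop st (r-1) c).1) ++ [c] = a :: ((pvPop st (r-1) c).1 ++ [c]) by simp]
      have hrw : (pvPop st (r-1) c).2 + 1 - 1 = (pvPop st (r-1) c).2 := by omega
      have hb2 : (i' : Int) + (((pvPop st (r-1) c).1 ++ [c]).length : Int) < (pvPop st (r-1) c).2 + 1 := by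
        simp only [List.length_append, List.length_cons, List.length_nil]
        push_cast
        omega
      have := ih cs ((pvPop st (r-1) c).1 ++ [c]) ((pvPop st (r-1) c).2 + 1)
        (by simpa using hi)
        (fun i hilt hh => by
          have := hbefore (i + 1) (by omega) (by simpa using hh)
          simpa using this)
        (by simpa using hat)
        hb2
        (fun x hx => by
          rcases List.mem_append.mp hx with h | h
          · exact hst x (hpre.mem h)
          · simp at h; subst h; exact hca)
      rw [this, hrw]
theorem pvRun_decomp (n : Nat) (s : List Char) (r : Int) (m : Char) (j : Nat)
    (hn : s.length = n) (hr0 : 0 ≤ r) (hrn : r < (s.length : Int))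
    (hm : PySem.List.max? (s.take (r.toNat + 1)) (fun x => x) = some m)
    (hj : PySem.List.index? (s.take (r.toNat + 1)) m = some j) :
    pvRun [] r s = m :: pvRun [] (r - j) (s.drop (j + 1)) := by
  induction n using Nat.strong_induction_on generalizing s r m j with
  | _ n ih =>
    cases s with
    | nil => simp at hrn; omega
    | cons a t =>
      rw [List.take_succ_cons] at hm hj
      have hmemw := PySem.List.max?_mem hm
      have hmax := PySem.List.max?_isMax hm
      by_cases hex : ∃ x ∈ t.take r.toNat, a < x
      · -- the window's max is strictly above a: a gets popped
        obtain ⟨x, hxmem, hax⟩ := hex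
        have ham : a < m := lt_of_lt_of_le hax (hmax x (List.mem_cons_of_mem a hxmem))
        have hmtk : m ∈ t.take r.toNat := by
          rcases List.mem_cons.mp hmemw with h | h
          · exact absurd h.symm (ne_of_lt ham)
          · exact h
        -- first index of an element strictly above a
        have hPex : ∃ i, i < t.length ∧ i < r.toNat ∧ a < t[i]! := by
          obtain ⟨i, hi, hieq⟩ := List.mem_iff_getElem.mp hxmem
          have hit : i < t.length := lt_of_lt_of_le hi (by simp [List.length_take])
          have hirt : i < r.toNat := lt_of_lt_of_le hi (by simp [List.length_take])
          refine ⟨i, hit, hirt, ?_⟩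
          rw [getElem!_pos t i hit]
          rw [List.getElem_take] at hieq
          rw [hieq]; exact hax
        obtain ⟨i₀, ⟨hi0t, hi0r, hi0gt⟩, hmin⟩ :
            ∃ i₀, (i₀ < t.length ∧ i₀ < r.toNat ∧ a < t[i₀]!) ∧
              ∀ i < i₀, ¬(i < t.length ∧ i < r.toNat ∧ a < t[i]!) :=
          ⟨Nat.find hPex, Nat.find_spec hPex, fun i hi => Nat.find_min hPex hi⟩
        have hbefore : ∀ i < i₀, ∀ _ : i < t.length, t[i]! ≤ a := by
          intro i hii hit
          by_cases hir : i < r.toNat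
          · have hm2 := hmin i hii
            push_neg at hm2
            exact hm2 hit hir
          · exact absurd hii (by omega)
        -- step 1: push a
        have step1 : pvRun [] r (a :: t) = pvRun [a] r t := by
          simp [pvRun, pvPop_nil]
        -- step 2: a is popped by the first larger element
        have step2 : pvRun [a] r t = pvRun [] (r - 1) t := by
          have := pvRun_bottom_popped i₀ t a [] r hi0t
            (fun i hii hh => by
              have := hbefore i hii hh
              rwa [getElem!_pos t i hh] at this)
            (by rw [← getElem!_pos t _ hi0t]; exact hi0gt)
            (by simp; omega)
            (by simp)
          simpa using this
        -- step 3: induction on the tail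
        have hr1 : 0 ≤ r - 1 := by omega
        have hrt : r - 1 < (t.length : Int) := by
          simp at hrn; omega
        have htk : t.take ((r-1).toNat + 1) = t.take r.toNat := by
          congr 1; omega
        have hm' : PySem.List.max? (t.take ((r-1).toNat + 1)) (fun x => x) = some m := by
          rw [htk]
          cases hmx : PySem.List.max? (t.take r.toNat) (fun x => x) with
          | none =>
            rw [PySem.List.max?_eq_none_iff] at hmx
            rw [hmx] at hmtk; simp at hmtk
          | some m' =>
            have h1 : m' ≤ m := hmax m' (List.mem_cons_of_mem a (PySem.List.max?_mem hmx))
            have h2 : m ≤ m' := PySem.List.max?_isMax hmx m hmtk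
            rw [le_antisymm h1 h2]
        obtain ⟨j', hj'eq, hjj⟩ : ∃ j', PySem.List.index? (t.take r.toNat) m = some j' ∧ j' + 1 = j := by
          rw [PySem.List.index?_cons_of_ne (List.take r.toNat t) (ne_of_lt ham)] at hj
          rcases hopt : PySem.List.index? (t.take r.toNat) m with _ | j'
          · rw [hopt] at hj; simp at hj
          · rw [hopt] at hj; simp at hj; exact ⟨j', rfl, hj⟩
        have hj'' : PySem.List.index? (t.take ((r-1).toNat + 1)) m = some j' := by rw [htk]; exact hj'eq
        have ihapp := ih t.length (by simp at hn; omega) t (r - 1) m j' rfl hr1 hrt hm' hj''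
        rw [step1, step2, ihapp, hjj]
        have : r - 1 - j' = r - (j' + 1 : Nat) := by push_cast; omega
        rw [this, ← hjj]
        rw [List.drop_succ_cons]
      · -- window max is a itself: a stays at the bottom
        push_neg at hex
        have hma : m = a := by
          have h1 : a ≤ m := hmax a (List.mem_cons_self)
          rcases List.mem_cons.mp hmemw with h | h
          · exact h.symm ▸ rfl
          · exact le_antisymm (hex m h) h1
        have hj0 : j = 0 := by
          rw [hma, PySem.List.index?_cons_self] at hj
          simpa using hj.symm
        subst hma hj0
        have step1 : pvRun [] r (m :: t) = pvRun [m] r t := by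
          simp [pvRun, pvPop_nil]
        have step2 : pvRun [m] r t = m :: pvRun [] r t := by
          have := pvRun_bottom_fixed t m [] r hr0
            (fun i hi hlt => by
              by_cases hir : i < r.toNat
              · refine absurd (hex t[i] ?_) (not_le.mpr hlt)
                have hlen : i < (t.take r.toNat).length := by
                  simp [List.length_take]; omega
                have : (t.take r.toNat)[i] = t[i] := List.getElem_take
                rw [← this]
                exact List.getElem_mem hlen
              · simp; omega)
            
          simpa using this
        rw [step1, step2]
        simp
theorem pvPick_eq_take (k : Nat) (s : List Char) (hk : 1 ≤ k) (hks : k ≤ s.length) :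
    pvPick s (k : Int) = (pvRun [] ((s.length : Int) - k) s).take k := by
  induction k generalizing s with
  | zero => omega
  | succ k' ih =>
    rw [pvPick, dif_pos (by push_cast; omega : (0:Int) < ((k'+1 : Nat) : Int))]
    have hr0 : (0:Int) ≤ (s.length : Int) - (k'+1 : Nat) := by push_cast; omega
    have hwin : PySem.List.slice s none (some ((s.length : Int) - ((k'+1:Nat):Int) + 1))
        = s.take (((s.length : Int) - (k'+1 : Nat)).toNat + 1) := by
      rw [PySem.List.slice_to s (by push_cast; omega)]
      congr 1
      push_cast
      omega
    rw [hwin]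
    set r : Int := (s.length : Int) - ((k'+1 : Nat) : Int) with hrdef
    clear_value r
    have hwne : s.take (r.toNat + 1) ≠ [] := by
      have : (s.take (r.toNat + 1)).length = min (r.toNat + 1) s.length := by simp
      intro hnil
      rw [hnil] at this
      simp at this
      omega
    cases hmx : PySem.List.max? (s.take (r.toNat + 1)) (fun x => x) with
    | none => exact absurd ((PySem.List.max?_eq_none_iff _ _).mp hmx) hwne
    | some m =>
      have hmmem := PySem.List.max?_mem hmx
      cases hix : PySem.List.index? (s.take (r.toNat + 1)) m with
      | none => exact absurd ((PySem.List.index?_eq_none_iff _ _).mp hix) (by simp [hmmem])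
      | some j =>
        obtain ⟨hjlt, hjget, -⟩ := PySem.List.getElem_of_index?_eq_some hix
        have hjr : j ≤ r.toNat := by
          have : (s.take (r.toNat + 1)).length ≤ r.toNat + 1 := by simp
          omega
        have hjs : j < s.length := by
          have : (s.take (r.toNat + 1)).length ≤ s.length := by simp
          omega
        have hdecomp := pvRun_decomp s.length s r m j rfl hr0 (by push_cast; omega) hmx hix
        rw [hdecomp]
        simp only [hmx, hix, Option.getD_some, List.take_succ_cons]
        have hdrop : PySem.List.slice s (some ((j:Int) + 1)) none = s.drop (j + 1) := by
          rw [PySem.List.slice_from s (by push_cast; omega)]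
          rw [show ((j:Int) + 1).toNat = j + 1 by omega]
        rw [hdrop]
        have hsub : ((k'+1 : Nat) : Int) - 1 = (k' : Nat) := by push_cast; omega
        rw [hsub]
        by_cases hk0 : k' = 0
        · subst hk0
          rw [pvPick, dif_neg (by simp)]
          simp
        · have hlen : k' ≤ (s.drop (j + 1)).length := by
            simp [List.length_drop]
            omega
          rw [ih (s.drop (j + 1)) (by omega) hlen]
          have hdl : (s.drop (j + 1)).length = s.length - (j + 1) := List.length_drop
          have hbud : (((s.drop (j + 1)).length : Nat) : Int) - (k' : Nat) = r - (j : Nat) := by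
            rw [hdl, Nat.cast_sub (by omega : j + 1 ≤ s.length)]
            push_cast
            omega
          rw [hbud]
-- ===== VERDICT (by name: the statement is the Claim_ definition above) =====
theorem strongest_batteries_spec : Claim_equal_strongest_batteries := by
  intro bb k _hdom hpre
  obtain ⟨hk, -, -⟩ := hpre
  unfold Spec_strongest_batteries strongest_batteries strongest_batteries_alt
  simp only []
  by_cases hcase : (bb.toList.length : Int) ≤ k
  · rw [if_pos hcase]
    rw [pvRun_nonpos bb.toList [] _ (by omega), List.nil_append]
    rw [PySem.List.slice_to bb.toList (by omega)]
    rw [List.take_of_length_le (by omega)]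
  · rw [if_neg hcase]
    have h1 : 1 ≤ k.toNat := by omega
    have h2 : k.toNat ≤ bb.toList.length := by omega
    have := pvPick_eq_take k.toNat bb.toList h1 h2
    rw [show ((k.toNat : Nat) : Int) = k by omega] at this
    rw [PySem.List.slice_to _ (by omega), this]
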